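-- pv_equiv track=rewrite | github.com/kang952175/CoTe | 프로그래머스/0/120843. 공 던지기/공 던지기.py | solution
-- ===== SOURCE A (Python) =====
-- def solution(numbers, k):
--     answer = 0
--     tmp = []
--     index = 0
--     for _ in range(k):
--         tmp.append(numbers[index])
--         index = (index + 2) % len(numbers)
--
--     answer = tmp[k-1]
--     return answer
-- ===== SOURCE B (Python) =====
-- def solution(numbers, k):
--     # Closed form: after k throws stepping by 2, the ball is at index 2*(k-1) mod len(numbers).
--     return numbers[(2 * (k - 1)) % len(numbers)]
-- ===== Notes on version B (the rewrite author's own statement) =====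
-- stated objective: faster
-- what changed: Replaces the k-step simulation loop that builds a list of visited positions with the closed-form index numbers[(2*(k-1)) % len(numbers)].
import Mathlib
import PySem

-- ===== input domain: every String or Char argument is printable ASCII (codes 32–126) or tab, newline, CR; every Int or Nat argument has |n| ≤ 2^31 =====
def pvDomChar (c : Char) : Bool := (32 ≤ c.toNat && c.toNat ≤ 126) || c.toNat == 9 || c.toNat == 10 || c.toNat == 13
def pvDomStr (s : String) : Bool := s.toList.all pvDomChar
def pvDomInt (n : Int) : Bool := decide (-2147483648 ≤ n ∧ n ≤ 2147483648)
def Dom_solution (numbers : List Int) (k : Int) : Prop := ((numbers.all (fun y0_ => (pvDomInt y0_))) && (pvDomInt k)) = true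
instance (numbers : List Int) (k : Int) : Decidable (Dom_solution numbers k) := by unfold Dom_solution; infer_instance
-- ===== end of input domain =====

-- B replaces A's k-step simulation loop by the closed-form index 2*(k-1) mod len(numbers) (O(1) vs O(k)).

-- ===== PORT A =====
-- literal port of A's loop: tmp grows by numbers[index], index = (index + 2) % len(numbers)
-- (tmp is accumulated in reverse by cons and reversed at the end: the O(1)-append transliteration of list.append)
def solution (numbers : List Int) (k : Int) : Int :=
  let st :=
    (PySem.List.pyRange 0 k 1).foldl
      (fun (st : List Int × Int) _ =>
        (PySem.List.pyGetD numbers st.2 0 :: st.1,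
         PySem.Int.mod (st.2 + 2) numbers.length))
      ([], 0)
  PySem.List.pyGetD st.1.reverse (k - 1) 0

-- ===== PORT B =====
def solution_alt (numbers : List Int) (k : Int) : Int :=
  PySem.List.pyGetD numbers (PySem.Int.mod (2 * (k - 1)) numbers.length) 0

-- ===== PRECONDITION & SPEC =====
-- Pre: A raises IndexError when numbers is empty (numbers[0]) or k < 1 (tmp[k-1] on a too-short tmp).
def Pre_solution (numbers : List Int) (k : Int) : Prop := numbers ≠ [] ∧ 1 ≤ k
instance (numbers : List Int) (k : Int) : Decidable (Pre_solution numbers k) := by unfold Pre_solution; infer_instance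
def pvWitness_solution : List Int × Int := ([1, 2, 3, 4], 5)

def Spec_solution (numbers : List Int) (k : Int) (out : Int) : Prop := out = solution_alt numbers k
instance (numbers : List Int) (k : Int) (out : Int) : Decidable (Spec_solution numbers k out) := by unfold Spec_solution; infer_instance

-- ===== CLAIM (what is proved, stated in full; the proofs are below) =====
def Claim_equal_solution : Prop := ∀ (numbers : List Int) (k : Int), Dom_solution numbers k → Pre_solution numbers k → Spec_solution numbers k (solution numbers k)

-- ===== LEMMAS AND PROOFS =====

-- a fold whose step ignores the list elements is an iterate
theorem foldl_ignore {α β : Type} (g : α → α) (l : List β) (s : α) :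
    l.foldl (fun st _ => g st) s = g^[l.length] s := by
  induction l generalizing s with
  | nil => rfl
  | cons x xs ih => simp [List.foldl_cons, ih, Function.iterate_succ_apply]

-- loop invariant: after m iterations, tmp lists the visited values and index = 2*m mod n
theorem loop_inv (numbers : List Int) (hne : numbers ≠ []) (m : Nat) :
    (fun (st : List Int × Int) =>
        (PySem.List.pyGetD numbers st.2 0 :: st.1,
         PySem.Int.mod (st.2 + 2) numbers.length))^[m] ([], 0) =
      (((List.range m).map
        (fun (i : Nat) => PySem.List.pyGetD numbers (PySem.Int.mod (2 * (i : Int)) numbers.length) 0)).reverse,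
       PySem.Int.mod (2 * (m : Int)) numbers.length) := by
  have hn : 0 < (numbers.length : Int) := by
    exact_mod_cast List.length_pos_iff.mpr hne
  induction m with
  | zero =>
    simp [PySem.Int.mod_eq_emod_of_pos hn]
  | succ m ih =>
    rw [Function.iterate_succ_apply', ih]
    simp only [List.range_succ, List.map_append, List.map_cons, List.map_nil,
      List.reverse_append, List.reverse_cons, List.reverse_nil, List.nil_append,
      List.cons_append]
    refine Prod.ext rfl ?_
    simp only [PySem.Int.mod_eq_emod_of_pos hn, Int.emod_add_emod]
    congr 1

-- ===== VERDICT (by name: the statement is the Claim_ definition above) =====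
theorem solution_spec : Claim_equal_solution := by
  intro numbers k _ hpre
  obtain ⟨hne, hk⟩ := hpre
  unfold Spec_solution solution solution_alt
  rw [foldl_ignore, PySem.List.length_pyRange_one]
  rw [loop_inv numbers hne]
  simp only [List.reverse_reverse]
  have hk1 : k - 1 = (((k - 0).toNat - 1 : Nat) : Int) := by omega
  have hlt : (k - 0).toNat - 1 < (k - 0).toNat := by omega
  rw [hk1, PySem.List.pyGetD_natCast, List.getD_eq_getElem _ _ (by simpa using hlt)]
  simp only [List.getElem_map, List.getElem_range]
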